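-- pv_equiv track=rewrite | github.com/dgasmith/opt_einsum | opt_einsum/contract.py | format_const_einsum_str
-- ===== SOURCE A (Python) =====
-- def format_const_einsum_str(einsum_str, constants):
--     """Add brackets to the constant terms in ``einsum_str``. For example:
--
--         >>> format_const_einsum_str('ab,bc,cd->ad', [0, 2])
--         'bc,[ab,cd]->ad'
--
--     No-op if there are no constants.
--     """
--     if not constants:
--         return einsum_str
--
--     if "->" in einsum_str:
--         lhs, rhs = einsum_str.split('->')
--         arrow = "->"
--     else:
--         lhs, rhs, arrow = einsum_str, "", ""
--
--     wrapped_terms = ["[{}]".format(t) if i in constants else t for i, t in enumerate(lhs.split(','))]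
--
--     formatted_einsum_str = "{}{}{}".format(','.join(wrapped_terms), arrow, rhs)
--
--     # merge adjacent constants
--     formatted_einsum_str = formatted_einsum_str.replace("],[", ',')
--     return formatted_einsum_str
-- ===== SOURCE B (Python) =====
-- def _group(pairs):
--     """Emit pieces: maximal runs of constant terms become one bracketed group."""
--     if not pairs:
--         return []
--     t, f = pairs[0]
--     rest = pairs[1:]
--     if not f:
--         return [t] + _group(rest)
--     k = 0
--     while k < len(rest) and rest[k][1]:
--         k += 1
--     run = [t] + [u for u, _ in rest[:k]]
--     return ['[' + ','.join(run) + ']'] + _group(rest[k:])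
--
--
-- def format_const_einsum_str(einsum_str, constants):
--     if not constants:
--         return einsum_str
--     if "->" in einsum_str:
--         lhs, rhs = einsum_str.split('->')
--         arrow = "->"
--     else:
--         lhs, rhs, arrow = einsum_str, "", ""
--     pairs = [(t, i in constants) for i, t in enumerate(lhs.split(','))]
--     return ','.join(_group(pairs)) + arrow + rhs
-- ===== Notes on version B (the rewrite author's own statement) =====
-- stated objective: simpler
-- what changed: B emits one bracketed group per maximal run of consecutive constant terms in a single grouping pass over the comma-split LHS, instead of A's wrap-every-constant-term-then-textually-merge adjacent brackets via replace('],[', ',').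
-- outside the precondition, e.g. on format_const_einsum_str('a],b', [1]): A returns 'a,b]', B returns 'a],[b]'
import Mathlib
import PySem

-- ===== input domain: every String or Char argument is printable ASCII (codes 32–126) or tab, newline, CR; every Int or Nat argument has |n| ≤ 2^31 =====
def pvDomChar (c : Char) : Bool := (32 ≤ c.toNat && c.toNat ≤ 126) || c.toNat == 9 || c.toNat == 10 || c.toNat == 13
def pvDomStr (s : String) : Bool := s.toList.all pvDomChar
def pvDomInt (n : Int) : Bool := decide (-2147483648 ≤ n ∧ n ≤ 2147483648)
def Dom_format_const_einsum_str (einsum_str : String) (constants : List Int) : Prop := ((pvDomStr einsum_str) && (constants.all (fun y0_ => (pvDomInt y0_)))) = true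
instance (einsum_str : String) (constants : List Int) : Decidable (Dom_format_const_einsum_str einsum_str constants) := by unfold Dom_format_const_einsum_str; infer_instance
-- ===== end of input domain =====

-- B replaces A's wrap-every-constant-then-textually-merge-"],["-idiom by a single grouping
-- pass over the terms (one bracketed piece per maximal run of constant terms); same cost,
-- simpler; return values proved equal on Pre_ (no brackets in the input, at most one "->").

-- ===== PORT A =====
-- lhs, rhs = einsum_str.split('->')  (ValueError when more than one '->': outside Pre_)
def pvSplitArrowA (sl : List Char) : List Char × List Char × List Char :=
  if PySem.Chars.isIn ['-', '>'] sl then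
    match PySem.Chars.splitOn sl ['-', '>'] with
    | [l, r] => (l, r, ['-', '>'])
    | _ => ([], [], ['-', '>'])
  else (sl, [], [])

def format_const_einsum_str (einsum_str : String) (constants : List Int) : String :=
  if constants = [] then einsum_str
  else
    let sl := einsum_str.toList
    let lra := pvSplitArrowA sl
    let wrapped := (PySem.List.enumerate (PySem.Chars.splitOn lra.1 [',']) 0).map
      (fun it => if constants.contains it.1 then '[' :: it.2 ++ [']'] else it.2)
    let formatted := PySem.Chars.join [','] wrapped ++ lra.2.2 ++ lra.2.1
    String.ofList (PySem.Chars.replace formatted [']', ',', '['] [','])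

-- ===== PORT B =====
-- lhs, rhs = einsum_str.split('->')  (same lines in Source B; ValueError outside Pre_)
def pvSplitArrowB (sl : List Char) : List Char × List Char × List Char :=
  if PySem.Chars.isIn ['-', '>'] sl then
    match PySem.Chars.splitOn sl ['-', '>'] with
    | [l, r] => (l, r, ['-', '>'])
    | _ => ([], [], ['-', '>'])
  else (sl, [], [])

-- the while loop of Source B's _group computing the length k of the leading constant run and
-- slicing rest[:k] / rest[k:] is ported as takeWhile / dropWhile on the flag (exact)
def pvGroup : List (List Char × Bool) → List (List Char)
  | [] => []
  | (t, f) :: rest =>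
    if f then
      ('[' :: PySem.Chars.join [','] (t :: (rest.takeWhile (·.2)).map (·.1)) ++ [']'])
        :: pvGroup (rest.dropWhile (·.2))
    else t :: pvGroup rest
termination_by l => l.length
decreasing_by
  · have := List.length_dropWhile_le (fun p => p.2) rest; simp; omega
  · simp

def format_const_einsum_str_alt (einsum_str : String) (constants : List Int) : String :=
  if constants = [] then einsum_str
  else
    let sl := einsum_str.toList
    let lra := pvSplitArrowB sl
    let pairs := (PySem.List.enumerate (PySem.Chars.splitOn lra.1 [',']) 0).map
      (fun it => (it.2, constants.contains it.1))
    String.ofList (PySem.Chars.join [','] (pvGroup pairs) ++ lra.2.2 ++ lra.2.1)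

-- ===== PRECONDITION & SPEC =====
-- Pre_ excludes (when constants is nonempty) strings with two or more "->", on which A's
-- tuple unpacking of split('->') raises ValueError, and strings already containing '[' or
-- ']', on which A's textual replace("],[", ",") can merge user-written brackets with the
-- ones it adds — malformed einsum input on which both behaviours are defensible.
def Pre_format_const_einsum_str (einsum_str : String) (constants : List Int) : Prop :=
  constants = [] ∨
    (PySem.Str.count einsum_str "->" ≤ 1 ∧
      '[' ∉ einsum_str.toList ∧ ']' ∉ einsum_str.toList)
instance (einsum_str : String) (constants : List Int) : Decidable (Pre_format_const_einsum_str einsum_str constants) := by unfold Pre_format_const_einsum_str; infer_instance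

def pvWitness_format_const_einsum_str : String × List Int := ("ab,bc,cd->ad", [0, 2])

def Spec_format_const_einsum_str (einsum_str : String) (constants : List Int) (out : String) : Prop := out = format_const_einsum_str_alt einsum_str constants
instance (einsum_str : String) (constants : List Int) (out : String) : Decidable (Spec_format_const_einsum_str einsum_str constants out) := by unfold Spec_format_const_einsum_str; infer_instance

-- ===== CLAIM (what is proved, stated in full; the proofs are below) =====
def Claim_equal_format_const_einsum_str : Prop := ∀ (einsum_str : String) (constants : List Int), Dom_format_const_einsum_str einsum_str constants → Pre_format_const_einsum_str einsum_str constants → Spec_format_const_einsum_str einsum_str constants (format_const_einsum_str einsum_str constants)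

-- ===== LEMMAS AND PROOFS =====

-- structural form of Python's non-overlapping left-to-right replace("],[", ",")
def pvRep : List Char → List Char
  | [] => []
  | c :: t => if [']', ',', '['].isPrefixOf (c :: t) then ',' :: pvRep (t.drop 2) else c :: pvRep t
termination_by l => l.length
decreasing_by
  all_goals simp [List.length_drop]

def pvWrap (p : List Char × Bool) : List Char := if p.2 then '[' :: p.1 ++ [']'] else p.1

def pvJ (ps : List (List Char × Bool)) : List Char := PySem.Chars.join [','] (ps.map pvWrap)

def pvSUF (ps : List (List Char × Bool)) (suf : List Char) : List Char :=
  if ps = [] then suf else ',' :: pvJ ps ++ suf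

def pvOut (ps : List (List Char × Bool)) (suf : List Char) : List Char :=
  PySem.Chars.join [','] (pvGroup ps) ++ suf

def pvRTail (ps : List (List Char × Bool)) (suf : List Char) : List Char :=
  ((ps.takeWhile (·.2)).map (·.1)).flatMap (fun u => ',' :: u) ++ [']'] ++
    (if ps.dropWhile (·.2) = [] then suf
     else ',' :: PySem.Chars.join [','] (pvGroup (ps.dropWhile (·.2))) ++ suf)

def pvClean (ps : List (List Char × Bool)) : Prop := ∀ p ∈ ps, '[' ∉ p.1 ∧ ']' ∉ p.1


lemma pvRep_go (fuel : Nat) : ∀ (l acc : List Char), l.length ≤ fuel →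
    PySem.Chars.replace.go [']', ',', '['] [','] fuel l acc = acc.reverse ++ pvRep l := by
  induction fuel with
  | zero =>
    intro l acc h
    have hl : l = [] := List.eq_nil_of_length_eq_zero (Nat.le_zero.mp h)
    subst hl
    rw [PySem.Chars.replace.go]
    simp [pvRep]
  | succ n ih =>
    intro l acc h
    cases l with
    | nil =>
      rw [PySem.Chars.replace.go]
      · simp [pvRep]
      · omega
    | cons c t =>
      rw [PySem.Chars.replace.go]
      by_cases hp : [']', ',', '['].isPrefixOf (c :: t)
      · have hd : List.drop [']', ',', '['].length (c :: t) = t.drop 2 := by simp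
        have hlen : (t.drop 2).length ≤ n := by
          simp at h ⊢; omega
        simp only [hp, if_true, hd]
        rw [ih _ _ hlen, pvRep]
        simp only [hp, if_true]
        simp
      · simp only [hp]
        rw [ih t (c :: acc) (by simp at h ⊢; omega), pvRep]
        simp only [hp]
        simp

lemma replace_eq_pvRep (s : List Char) :
    PySem.Chars.replace s [']', ',', '['] [','] = pvRep s := by
  rw [PySem.Chars.replace]
  simp
  exact pvRep_go s.length s [] (le_refl _)

lemma pvRep_skip (p : List Char) (s : List Char) (h : ']' ∉ p) :
    pvRep (p ++ s) = p ++ pvRep s := by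
  induction p with
  | nil => simp
  | cons c t ih =>
    have hc : c ≠ ']' := by intro he; exact h (he ▸ List.mem_cons_self ..)
    rw [List.cons_append, pvRep]
    have hnp : ¬ [']', ',', '['].isPrefixOf (c :: (t ++ s)) := by
      simp [List.isPrefixOf]
      intro he; exact absurd he.symm hc
    rw [if_neg hnp, ih (fun hm => h (List.mem_cons_of_mem _ hm))]
    simp

lemma pvRep_nopat (s : List Char) (h : '[' ∉ s) : pvRep s = s := by
  induction s with
  | nil => simp [pvRep]
  | cons c t ih =>
    rw [pvRep]
    have hnp : ¬ [']', ',', '['].isPrefixOf (c :: t) := by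
      intro hp
      rw [List.isPrefixOf_iff_prefix] at hp
      rcases hp with ⟨u, hu⟩
      apply h
      rw [← hu]
      simp
    rw [if_neg hnp, ih (fun hm => h (List.mem_cons_of_mem _ hm))]

lemma pvRep_rsep (X : List Char) (h : X.head? ≠ some '[') :
    pvRep (']' :: ',' :: X) = ']' :: ',' :: pvRep X := by
  rw [pvRep]
  have h1 : ¬ [']', ',', '['].isPrefixOf (']' :: ',' :: X) := by
    cases X with
    | nil => simp [List.isPrefixOf]
    | cons c t =>
      simp [List.isPrefixOf] at h ⊢
      intro he
      exact h he.symm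
  rw [if_neg h1, pvRep]
  have h2 : ¬ [']', ',', '['].isPrefixOf (',' :: X) := by simp [List.isPrefixOf]
  rw [if_neg h2]

lemma pvGroup_eq_nil_iff (ps : List (List Char × Bool)) : pvGroup ps = [] ↔ ps = [] := by
  cases ps with
  | nil => simp [pvGroup]
  | cons p rest =>
    obtain ⟨t, f⟩ := p
    rw [pvGroup]
    constructor
    · intro h; by_cases hf : f <;> simp [hf] at h
    · intro h; exact absurd h (by simp)

lemma join_cons (t : List Char) (gs : List (List Char)) :
    PySem.Chars.join [','] (t :: gs) =
      t ++ (if gs = [] then [] else ',' :: PySem.Chars.join [','] gs) := by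
  cases gs with
  | nil => simp [PySem.Chars.join_singleton]
  | cons g r => simp [PySem.Chars.join_cons_cons]

lemma join_comma (t : List Char) (gs : List (List Char)) :
    PySem.Chars.join [','] (t :: gs) = t ++ gs.flatMap (fun u => ',' :: u) := by
  induction gs generalizing t with
  | nil => simp [PySem.Chars.join_singleton]
  | cons g r ih => rw [PySem.Chars.join_cons_cons, ih g]; simp

lemma pvJ_cons (p : List Char × Bool) (rest : List (List Char × Bool)) (suf : List Char) :
    pvJ (p :: rest) ++ suf = pvWrap p ++ pvSUF rest suf := by
  rw [pvJ, pvSUF, List.map_cons, join_cons]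
  cases rest with
  | nil => simp
  | cons q r => simp [pvJ]

lemma pvLR_nil (suf : List Char) (hsuf : '[' ∉ suf) :
    pvRep (pvJ [] ++ suf) = pvOut [] suf ∧
    pvRep (']' :: pvSUF [] suf) = pvRTail [] suf := by
  constructor
  · rw [pvJ, pvOut, show pvGroup [] = [] by simp [pvGroup]]
    simp [PySem.Chars.join_nil]
    exact pvRep_nopat suf hsuf
  · rw [pvSUF, if_pos rfl, pvRTail]
    rw [pvRep_nopat (']' :: suf) (by simp [hsuf])]
    simp

lemma pvLR (n : Nat) : ∀ (ps : List (List Char × Bool)) (suf : List Char),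
    ps.length ≤ n → pvClean ps → '[' ∉ suf →
    pvRep (pvJ ps ++ suf) = pvOut ps suf ∧
    pvRep (']' :: pvSUF ps suf) = pvRTail ps suf := by
  induction n with
  | zero =>
    intro ps suf hlen _ hsuf
    have hps : ps = [] := List.eq_nil_of_length_eq_zero (Nat.le_zero.mp hlen)
    subst hps
    exact pvLR_nil suf hsuf
  | succ n ih =>
    intro ps suf hlen hclean hsuf
    cases ps with
    | nil => exact pvLR_nil suf hsuf
    | cons p rest =>
      obtain ⟨t, f⟩ := p
      have hct : '[' ∉ t ∧ ']' ∉ t := hclean (t, f) (List.mem_cons_self ..)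
      have hcrest : pvClean rest := fun q hq => hclean q (List.mem_cons_of_mem _ hq)
      have hlr : rest.length ≤ n := by simp at hlen; omega
      have hL : pvRep (pvJ ((t, f) :: rest) ++ suf) = pvOut ((t, f) :: rest) suf := by
        rw [pvJ_cons]
        cases f with
        | false =>
          cases rest with
          | nil =>
            rw [pvSUF, if_pos rfl]
            rw [show pvWrap (t, false) = t from rfl]
            rw [pvRep_skip t suf hct.2, pvRep_nopat suf hsuf]
            rw [pvOut, show pvGroup [(t, false)] = [t] by simp [pvGroup],
              PySem.Chars.join_singleton]
          | cons q r =>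
            rw [pvSUF, if_neg (by simp)]
            rw [show pvWrap (t, false) = t from rfl]
            rw [show t ++ (',' :: pvJ (q :: r) ++ suf) = (t ++ [',']) ++ (pvJ (q :: r) ++ suf) by
              simp]
            rw [pvRep_skip (t ++ [',']) _ (by simp [hct.2])]
            rw [(ih (q :: r) suf hlr hcrest hsuf).1]
            rw [pvOut, pvOut, show pvGroup ((t, false) :: q :: r) = t :: pvGroup (q :: r) by
              simp [pvGroup]]
            rw [join_cons t (pvGroup (q :: r)),
              if_neg (by rw [pvGroup_eq_nil_iff]; simp)]
            simp
        | true =>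
          rw [show pvWrap (t, true) = '[' :: t ++ [']'] from rfl]
          rw [show ('[' :: t ++ [']']) ++ pvSUF rest suf = ('[' :: t) ++ (']' :: pvSUF rest suf) by
            simp]
          rw [pvRep_skip ('[' :: t) _ (by simp [hct.2])]
          rw [(ih rest suf hlr hcrest hsuf).2]
          rw [pvOut, show pvGroup ((t, true) :: rest) =
            ('[' :: PySem.Chars.join [','] (t :: (rest.takeWhile (·.2)).map (·.1)) ++ [']'])
              :: pvGroup (rest.dropWhile (·.2)) by simp [pvGroup]]
          rw [join_cons, join_comma, pvRTail]
          by_cases hdw : rest.dropWhile (·.2) = []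
          · rw [if_pos hdw, if_pos ((pvGroup_eq_nil_iff _).mpr hdw)]
            simp
          · rw [if_neg hdw, if_neg (fun hh => hdw ((pvGroup_eq_nil_iff _).mp hh))]
            simp
      refine ⟨hL, ?_⟩
      have hSUF : pvSUF ((t, f) :: rest) suf = ',' :: (pvWrap (t, f) ++ pvSUF rest suf) := by
        rw [pvSUF, if_neg (by simp)]
        have := pvJ_cons (t, f) rest suf
        simp only [List.cons_append]
        rw [show pvJ ((t, f) :: rest) ++ suf = pvWrap (t, f) ++ pvSUF rest suf from this]
      cases f with
      | false =>
        rw [hSUF, show pvWrap (t, false) = t from rfl]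
        have hhd : (t ++ pvSUF rest suf).head? ≠ some '[' := by
          cases t with
          | cons c t' =>
            simp
            intro he
            exact hct.1 (by simp [he])
          | nil =>
            simp
            cases rest with
            | nil =>
              rw [pvSUF, if_pos rfl]
              cases suf with
              | nil => simp
              | cons c s' =>
                simp
                intro he
                exact hsuf (by simp [he])
            | cons q r =>
              rw [pvSUF, if_neg (by simp)]
              simp
        rw [pvRep_rsep _ hhd]
        rw [show t ++ pvSUF rest suf = pvJ ((t, false) :: rest) ++ suf from
          (pvJ_cons (t, false) rest suf).symm]
        rw [hL]
        rw [pvRTail]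
        rw [show List.takeWhile (fun p => p.2) ((t, false) :: rest) = [] by simp]
        rw [show List.dropWhile (fun p => p.2) ((t, false) :: rest) = (t, false) :: rest by simp]
        rw [if_neg (by simp)]
        rw [pvOut]
        simp
      | true =>
        rw [hSUF, show pvWrap (t, true) = '[' :: t ++ [']'] from rfl]
        rw [show (']' :: ',' :: (('[' :: t ++ [']']) ++ pvSUF rest suf)) =
          ']' :: ',' :: '[' :: (t ++ (']' :: pvSUF rest suf)) by simp]
        rw [pvRep, if_pos (by simp [List.isPrefixOf])]
        rw [show List.drop 2 (',' :: '[' :: (t ++ (']' :: pvSUF rest suf))) =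
          t ++ (']' :: pvSUF rest suf) from rfl]
        rw [pvRep_skip t _ hct.2]
        rw [(ih rest suf hlr hcrest hsuf).2]
        rw [pvRTail, pvRTail]
        rw [show List.takeWhile (fun p => p.2) ((t, true) :: rest) =
          (t, true) :: List.takeWhile (fun p => p.2) rest by simp]
        rw [show List.dropWhile (fun p => p.2) ((t, true) :: rest) =
          List.dropWhile (fun p => p.2) rest by simp]
        simp

lemma splitOn_go_chars (sep : List Char) (fuel : Nat) :
    ∀ (l cur : List Char) (acc : List (List Char)) (p : List Char),
      p ∈ PySem.Chars.splitOn.go sep fuel l cur acc → ∀ c ∈ p,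
        c ∈ l ∨ c ∈ cur ∨ ∃ q ∈ acc, c ∈ q := by
  induction fuel with
  | zero =>
    intro l cur acc p hp c hc
    rw [PySem.Chars.splitOn.go] at hp
    simp at hp
    rcases hp with h | h
    · exact Or.inr (Or.inr ⟨p, h, hc⟩)
    · rw [h] at hc; simp at hc
      rcases hc with h2 | h2
      · exact Or.inr (Or.inl h2)
      · exact Or.inl h2
  | succ n ih =>
    intro l cur acc p hp c hc
    cases l with
    | nil =>
      rw [PySem.Chars.splitOn.go] at hp
      · simp at hp
        rcases hp with h | h
        · exact Or.inr (Or.inr ⟨p, h, hc⟩)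
        · rw [h] at hc; simp at hc; exact Or.inr (Or.inl hc)
      · omega
    | cons d t =>
      rw [PySem.Chars.splitOn.go] at hp
      by_cases hpre : sep.isPrefixOf (d :: t)
      · simp only [hpre, if_true] at hp
        rcases ih _ _ _ _ hp c hc with h | h | h
        · exact Or.inl (List.mem_of_mem_drop h)
        · simp at h
        · rcases h with ⟨q, hq, hcq⟩
          simp at hq
          rcases hq with h2 | h2
          · rw [h2] at hcq; simp at hcq; exact Or.inr (Or.inl hcq)
          · exact Or.inr (Or.inr ⟨q, h2, hcq⟩)
      · simp only [hpre] at hp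
        rcases ih _ _ _ _ hp c hc with h | h | h
        · exact Or.inl (List.mem_cons_of_mem _ h)
        · simp at h
          rcases h with h2 | h2
          · exact Or.inl (by simp [h2])
          · exact Or.inr (Or.inl h2)
        · exact Or.inr (Or.inr h)

lemma splitOn_chars (s sep p : List Char) (hp : p ∈ PySem.Chars.splitOn s sep) :
    ∀ c ∈ p, c ∈ s := by
  intro c hc
  rw [PySem.Chars.splitOn] at hp
  rcases splitOn_go_chars sep (s.length + 1) s [] [] p hp c hc with h | h | h
  · exact h
  · simp at h
  · simp at h

lemma main_core (lhs rhs arrow : List Char) (cs : List Int)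
    (hl1 : '[' ∉ lhs) (hl2 : ']' ∉ lhs) (hr : '[' ∉ rhs) (ha : '[' ∉ arrow) :
    PySem.Chars.replace
      (PySem.Chars.join [','] ((PySem.List.enumerate (PySem.Chars.splitOn lhs [',']) 0).map
        (fun it => if cs.contains it.1 then '[' :: it.2 ++ [']'] else it.2)) ++ arrow ++ rhs)
      [']', ',', '['] [','] =
    PySem.Chars.join [','] (pvGroup ((PySem.List.enumerate (PySem.Chars.splitOn lhs [',']) 0).map
      (fun it => (it.2, cs.contains it.1)))) ++ arrow ++ rhs := by
  set pairs := (PySem.List.enumerate (PySem.Chars.splitOn lhs [',']) 0).map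
      (fun it => (it.2, cs.contains it.1)) with hpairs
  have hwrapped : (PySem.List.enumerate (PySem.Chars.splitOn lhs [',']) 0).map
      (fun it => if cs.contains it.1 then '[' :: it.2 ++ [']'] else it.2) = pairs.map pvWrap := by
    rw [hpairs, List.map_map]
    rfl
  rw [hwrapped, replace_eq_pvRep]
  have hclean : pvClean pairs := by
    intro p hp
    rw [hpairs] at hp
    rcases List.mem_map.mp hp with ⟨it, hit, hpe⟩
    have hterm : p.1 ∈ PySem.Chars.splitOn lhs [','] := by
      rw [← hpe]
      rw [← PySem.List.map_snd_enumerate (PySem.Chars.splitOn lhs [',']) 0]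
      exact List.mem_map_of_mem hit
    constructor
    · intro hmem; exact hl1 (splitOn_chars lhs [','] p.1 hterm '[' hmem)
    · intro hmem; exact hl2 (splitOn_chars lhs [','] p.1 hterm ']' hmem)
  have hsuf : '[' ∉ arrow ++ rhs := by
    intro h
    rcases List.mem_append.mp h with h | h
    · exact ha h
    · exact hr h
  have hmain := (pvLR pairs.length pairs (arrow ++ rhs) le_rfl hclean hsuf).1
  rw [pvJ, pvOut] at hmain
  rw [List.append_assoc, hmain, List.append_assoc]

-- ===== VERDICT (by name: the statement is the Claim_ definition above) =====
theorem format_const_einsum_str_spec : Claim_equal_format_const_einsum_str := by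
  unfold Claim_equal_format_const_einsum_str
  intro s cs _hdom hpre
  unfold Spec_format_const_einsum_str
  by_cases hc : cs = []
  · simp [format_const_einsum_str, format_const_einsum_str_alt, hc]
  · have hpre' : '[' ∉ s.toList ∧ ']' ∉ s.toList := by
      rcases hpre with h | h
      · exact absurd h hc
      · exact ⟨h.2.1, h.2.2⟩
    rw [format_const_einsum_str, format_const_einsum_str_alt, if_neg hc, if_neg hc]
    dsimp only
    rw [show pvSplitArrowB s.toList = pvSplitArrowA s.toList from rfl]
    rw [pvSplitArrowA]
    by_cases hin : PySem.Chars.isIn ['-', '>'] s.toList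
    · rw [if_pos hin]
      cases hm : PySem.Chars.splitOn s.toList ['-', '>'] with
      | nil => exact congrArg String.ofList (main_core [] [] ['-', '>'] cs (by simp) (by simp) (by simp) (by decide))
      | cons l parts =>
        cases parts with
        | nil => exact congrArg String.ofList (main_core [] [] ['-', '>'] cs (by simp) (by simp) (by simp) (by decide))
        | cons r parts2 =>
          cases parts2 with
          | nil =>
            have hl : ∀ c ∈ l, c ∈ s.toList := splitOn_chars _ _ l (by rw [hm]; simp)
            have hrr : ∀ c ∈ r, c ∈ s.toList := splitOn_chars _ _ r (by rw [hm]; simp)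
            exact congrArg String.ofList (main_core l r ['-', '>'] cs
              (fun h => hpre'.1 (hl _ h)) (fun h => hpre'.2 (hl _ h))
              (fun h => hpre'.1 (hrr _ h)) (by decide))
          | cons r2 parts3 => exact congrArg String.ofList (main_core [] [] ['-', '>'] cs (by simp) (by simp) (by simp) (by decide))
    · rw [if_neg hin]
      exact congrArg String.ofList (main_core s.toList [] [] cs hpre'.1 hpre'.2 (by simp) (by simp))
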